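-- pv_equiv track=rewrite | github.com/mkournio/ML-BSG | simbad_bsgs.py | find_id
-- ===== SOURCE A (Python) =====
-- def find_id(x):
--  x = x.split('|')
--  for c in ['HD','HR','BD','MCW','HIP','Hen','LS','ALS','2MASS','TIC']:
--    for i in x :
--      i=''.join(i.split())
--      if i.startswith(c):
--       return i
--  return i
-- ===== SOURCE B (Python) =====
-- def find_id(x):
--     cats = ['HD', 'HR', 'BD', 'MCW', 'HIP', 'Hen', 'LS', 'ALS', '2MASS', 'TIC']
--
--     def rank(t):
--         for k, c in enumerate(cats):
--             if t.startswith(c):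
--                 return k
--         return None
--
--     toks = [''.join(tok.split()) for tok in x.split('|')]
--     best_r, best_t = len(cats), toks[-1]
--     for t in toks:
--         r = rank(t)
--         if r is not None and r < best_r:
--             best_r, best_t = r, t
--     return best_t
-- ===== Notes on version B (the rewrite author's own statement) =====
-- stated objective: alternative
-- what changed: Replaces the catalog-outer/token-inner nested rescan (which re-cleans every token once per catalog) with a single pass over the tokens, cleaned once each, keeping the earliest token of strictly smallest catalog rank; the last cleaned token is the initial best, reproducing the fallback.
import Mathlib
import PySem

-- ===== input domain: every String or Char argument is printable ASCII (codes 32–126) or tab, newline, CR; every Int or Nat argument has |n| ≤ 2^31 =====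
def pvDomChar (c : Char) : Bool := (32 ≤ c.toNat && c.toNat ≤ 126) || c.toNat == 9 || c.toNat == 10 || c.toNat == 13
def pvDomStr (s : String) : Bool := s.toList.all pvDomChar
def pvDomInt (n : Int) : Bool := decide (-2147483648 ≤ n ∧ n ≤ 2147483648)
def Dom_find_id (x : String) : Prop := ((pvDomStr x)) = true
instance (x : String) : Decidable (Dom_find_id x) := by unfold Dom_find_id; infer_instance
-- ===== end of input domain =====

-- B is an alternative decomposition: one pass over the tokens keeping the earliest
-- token of strictly smallest catalog rank, instead of A's catalog-outer nested rescans.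

-- ''.join(i.split())  (shared by both Pythons verbatim)
def pvClean (i : String) : String := PySem.Str.join "" (PySem.Str.split₀ i)

-- ===== PORT A =====
-- inner loop: for i in x: i=''.join(i.split()); if i.startswith(c): return i
def pvInnerA (c : String) : List String → Option String
  | [] => none
  | i :: rest =>
    let i' := pvClean i
    if PySem.Str.startswith i' c then some i' else pvInnerA c rest

-- outer loop over the catalog prefixes, early return
def pvOuterA (toks : List String) : List String → Option String
  | [] => none
  | c :: cs =>
    match pvInnerA c toks with
    | some r => some r
    | none => pvOuterA toks cs

def find_id (x : String) : String :=
  let toks := (PySem.Str.split? x "|").getD []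
  match pvOuterA toks ["HD", "HR", "BD", "MCW", "HIP", "Hen", "LS", "ALS", "2MASS", "TIC"] with
  | some r => r
  | none =>
    -- fallback `return i`: the cleaned last token (split always yields ≥ 1 token)
    match toks.getLast? with
    | some i => pvClean i
    | none => ""

-- ===== PORT B =====
def pvCats : List String := ["HD", "HR", "BD", "MCW", "HIP", "Hen", "LS", "ALS", "2MASS", "TIC"]

-- rank(t): for k, c in enumerate(cats): if t.startswith(c): return k
def pvRankGo (t : String) (k : Int) : List String → Option Int
  | [] => none
  | c :: cs => if PySem.Str.startswith t c then some k else pvRankGo t (k + 1) cs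

def pvRank (t : String) : Option Int := pvRankGo t 0 pvCats

-- loop body: r = rank(t); if r is not None and r < best_r: best_r, best_t = r, t
def pvStep (st : Int × String) (t : String) : Int × String :=
  match pvRank t with
  | some r => if r < st.1 then (r, t) else st
  | none => st

def find_id_alt (x : String) : String :=
  let toks := ((PySem.Str.split? x "|").getD []).map pvClean
  match toks.getLast? with
  | none => ""   -- unreachable: split always yields ≥ 1 token
  | some lastT => (toks.foldl pvStep (10, lastT)).2

-- ===== PRECONDITION & SPEC =====
def Spec_find_id (x : String) (out : String) : Prop := out = find_id_alt x
instance (x : String) (out : String) : Decidable (Spec_find_id x out) := by unfold Spec_find_id; infer_instance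

-- ===== CLAIM (what is proved, stated in full; the proofs are below) =====
def Claim_equal_find_id : Prop := ∀ (x : String), Dom_find_id x → Spec_find_id x (find_id x)

-- ===== LEMMAS AND PROOFS =====

-- A's outer scan, rephrased over the already-cleaned token list
def oscan (ts : List String) : List String → Option String
  | [] => none
  | c :: cs =>
    match ts.find? (fun t => PySem.Str.startswith t c) with
    | some r => some r
    | none => oscan ts cs

-- Nat-indexed rank over an arbitrary catalog list
def rk0 (t : String) : List String → Option Nat
  | [] => none
  | c :: cs => if PySem.Str.startswith t c then some 0 else (rk0 t cs).map (· + 1)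

-- generic fold with ranks taken over cs at offset k
def gstep (cs : List String) (k : Int) (st : Int × String) (t : String) : Int × String :=
  match pvRankGo t k cs with
  | some r => if r < st.1 then (r, t) else st
  | none => st

theorem pvInnerA_eq_find? (c : String) (toks : List String) :
    pvInnerA c toks = (toks.map pvClean).find? (fun t => PySem.Str.startswith t c) := by
  induction toks with
  | nil => rfl
  | cons i rest ih =>
    simp only [pvInnerA, List.map_cons, List.find?_cons]
    cases h : PySem.Str.startswith (pvClean i) c
    · simp only [Bool.false_eq_true, if_false, ih]
    · simp only [if_true]

theorem pvOuterA_eq_oscan (toks : List String) (cs : List String) :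
    pvOuterA toks cs = oscan (toks.map pvClean) cs := by
  induction cs with
  | nil => rfl
  | cons c cs ih => simp only [pvOuterA, oscan, pvInnerA_eq_find?, ih]

theorem pvRankGo_eq (t : String) (k : Int) (cs : List String) :
    pvRankGo t k cs = Option.map (fun m : Nat => k + (m : Int)) (rk0 t cs) := by
  induction cs generalizing k with
  | nil => rfl
  | cons c cs ih =>
    simp only [pvRankGo, rk0]
    cases h : PySem.Str.startswith t c
    · simp only [Bool.false_eq_true, if_false, ih, Option.map_map]
      cases rk0 t cs with
      | none => rfl
      | some m =>
        simp only [Option.map_some, Function.comp_apply, Option.some_inj]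
        push_cast
        ring
    · simp only [if_true, Option.map_some]
      norm_num

theorem rk0_take (t : String) (cs : List String) (j : Nat) :
    rk0 t (cs.take j) = (rk0 t cs).bind (fun m => if m < j then some m else none) := by
  induction cs generalizing j with
  | nil => simp [rk0]
  | cons c cs ih =>
    cases j with
    | zero =>
      simp only [List.take_zero, rk0]
      cases h : PySem.Str.startswith t c
      · simp only [Bool.false_eq_true, if_false]
        cases rk0 t cs <;> simp
      · simp
    | succ j =>
      simp only [List.take_succ_cons, rk0]
      cases h : PySem.Str.startswith t c
      · simp only [Bool.false_eq_true, if_false, ih]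
        cases rk0 t cs with
        | none => rfl
        | some m =>
          by_cases hm : m < j <;>
            simp [hm]
      · simp

theorem oscan_cons (t : String) (ts : List String) (cs : List String) :
    oscan (t :: ts) cs =
      match rk0 t cs with
      | none => oscan ts cs
      | some m => some ((oscan ts (cs.take m)).getD t) := by
  induction cs with
  | nil => rfl
  | cons c cs ih =>
    simp only [oscan, rk0, List.find?_cons]
    cases h : PySem.Str.startswith t c
    · simp only [Bool.false_eq_true, if_false]
      cases hr : rk0 t cs with
      | none =>
        simp only [Option.map_none]
        rw [ih, hr]
      | some m =>
        simp only [Option.map_some]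
        rw [ih, hr]
        simp only [List.take_succ_cons, oscan]
        cases hf : ts.find? (fun u => PySem.Str.startswith u c) <;> rfl
    · simp only [if_true, List.take_zero]
      cases hf : ts.find? fun u => PySem.Str.startswith u c <;>
        simp [oscan]

theorem oscan_nil (cs : List String) : oscan ([] : List String) cs = none := by
  induction cs with
  | nil => rfl
  | cons c cs ih => simp only [oscan, List.find?_nil, ih]

theorem gfold_eq (cs : List String) (k : Int) (ts : List String) :
    ∀ (j : Nat) (bt : String), j ≤ cs.length →
      (ts.foldl (gstep cs k) (k + (j : Int), bt)).2 = (oscan ts (cs.take j)).getD bt := by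
  induction ts with
  | nil => intro j bt _; simp [oscan_nil]
  | cons t ts ih =>
    intro j bt hj
    simp only [List.foldl_cons, gstep, pvRankGo_eq]
    rw [oscan_cons]
    cases hr : rk0 t cs with
    | none =>
      have hcut : rk0 t (cs.take j) = none := by rw [rk0_take, hr]; rfl
      simp only [Option.map_none, hcut]
      exact ih j bt hj
    | some m =>
      by_cases hm : m < j
      · have hcut : rk0 t (cs.take j) = some m := by rw [rk0_take, hr]; simp [hm]
        have hlt : k + (m : Int) < k + (j : Int) := by
          have h' : (m : Int) < (j : Int) := by exact_mod_cast hm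
          omega
        simp only [Option.map_some, hcut, hlt, if_pos]
        have hmj : m ≤ cs.length := le_of_lt (lt_of_lt_of_le hm hj)
        rw [ih m t hmj, List.take_take]
        have : min m j = m := Nat.min_eq_left (le_of_lt hm)
        rw [this, Option.getD_some]
      · have hcut : rk0 t (cs.take j) = none := by rw [rk0_take, hr]; simp [hm]
        have hge : ¬ (k + (m : Int) < k + (j : Int)) := by
          have h' : ¬ ((m : Int) < (j : Int)) := by exact_mod_cast hm
          omega
        simp only [Option.map_some, hcut, hge, if_neg, not_false_iff]
        exact ih j bt hj

theorem getLast?_map_pv (f : String → String) : ∀ (l : List String),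
    (l.map f).getLast? = l.getLast?.map f
  | [] => rfl
  | [a] => rfl
  | a :: b :: l => by
    simp only [List.map_cons, List.getLast?_cons_cons]
    simpa using getLast?_map_pv f (b :: l)

theorem pvStep_eq_gstep : pvStep = gstep pvCats 0 := by
  funext st t
  simp only [pvStep, gstep, pvRank]

-- ===== VERDICT (by name: the statement is the Claim_ definition above) =====
theorem find_id_spec : Claim_equal_find_id := by
  intro x _
  unfold Spec_find_id find_id find_id_alt
  cases htoks : (PySem.Str.split? x "|").getD [] with
  | nil =>
    simp only [List.map_nil, List.getLast?_nil]
    rw [pvOuterA_eq_oscan]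
    simp only [List.map_nil, oscan_nil]
  | cons t0 rest =>
    have hne : ((t0 :: rest).map pvClean) ≠ [] := by simp
    obtain ⟨lastT, hlast⟩ := List.getLast?_isSome.mpr hne |> Option.isSome_iff_exists.mp
    simp only [hlast]
    rw [pvStep_eq_gstep]
    have h10 : ((10 : Int), lastT) = ((0 : Int) + ((10 : Nat) : Int), lastT) := by norm_num
    rw [h10, gfold_eq pvCats 0 ((t0 :: rest).map pvClean) 10 lastT (by simp [pvCats])]
    have hcats : pvCats.take 10 = pvCats := by simp [pvCats]
    rw [hcats, pvOuterA_eq_oscan]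
    have hfall :
        (match (t0 :: rest).getLast? with
          | some i => pvClean i
          | none => "") = lastT := by
      rw [getLast?_map_pv] at hlast
      cases hg : (t0 :: rest).getLast? with
      | none => simp [hg] at hlast
      | some i =>
        rw [hg] at hlast
        simpa using hlast
    cases ho : oscan ((t0 :: rest).map pvClean) pvCats with
    | some r =>
      rw [show (["HD", "HR", "BD", "MCW", "HIP", "Hen", "LS", "ALS", "2MASS", "TIC"] : List String)
          = pvCats from rfl, ho]
      rfl
    | none =>
      rw [show (["HD", "HR", "BD", "MCW", "HIP", "Hen", "LS", "ALS", "2MASS", "TIC"] : List String)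
          = pvCats from rfl, ho]
      exact hfall
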